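-- pv_equiv track=rewrite | github.com/qinfen1127/LINUX_ENV | script/port_shell.py | inout_sort
-- ===== SOURCE A (Python) =====
-- def inout_sort(all_signal,in_signal,out_signal):
--     inout_only = []
--     for signal in all_signal:
--         if signal in in_signal:
--             inout_only.append("in")
--         elif signal in out_signal:
--             inout_only.append("out")
--         else:
--             inout_only.append("inout")
--     return inout_only
-- ===== SOURCE B (Python) =====
-- def inout_sort(all_signal, in_signal, out_signal):
--     # Inverted control flow: start with every slot labelled "inout", build an
--     # index signal -> positions in all_signal, then scatter-write "out" for the
--     # out_signal pass and "in" for the in_signal pass (last pass wins ties,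
--     # matching A's if/elif precedence).
--     result = ["inout"] * len(all_signal)
--     positions = {}
--     for i, sig in enumerate(all_signal):
--         positions.setdefault(sig, []).append(i)
--     for sig in out_signal:
--         for i in positions.get(sig, []):
--             result[i] = "out"
--     for sig in in_signal:
--         for i in positions.get(sig, []):
--             result[i] = "in"
--     return result
-- ===== Notes on version B (the rewrite author's own statement) =====
-- stated objective: faster
-- what changed: Inverts the control flow: instead of scanning both membership lists for every element, B initialises all labels to 'inout', builds an inverted index signal->positions once, and scatter-writes 'out' then 'in' over those positions (the later 'in' pass overwrites, matching A's if/elif precedence).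
import Mathlib
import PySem

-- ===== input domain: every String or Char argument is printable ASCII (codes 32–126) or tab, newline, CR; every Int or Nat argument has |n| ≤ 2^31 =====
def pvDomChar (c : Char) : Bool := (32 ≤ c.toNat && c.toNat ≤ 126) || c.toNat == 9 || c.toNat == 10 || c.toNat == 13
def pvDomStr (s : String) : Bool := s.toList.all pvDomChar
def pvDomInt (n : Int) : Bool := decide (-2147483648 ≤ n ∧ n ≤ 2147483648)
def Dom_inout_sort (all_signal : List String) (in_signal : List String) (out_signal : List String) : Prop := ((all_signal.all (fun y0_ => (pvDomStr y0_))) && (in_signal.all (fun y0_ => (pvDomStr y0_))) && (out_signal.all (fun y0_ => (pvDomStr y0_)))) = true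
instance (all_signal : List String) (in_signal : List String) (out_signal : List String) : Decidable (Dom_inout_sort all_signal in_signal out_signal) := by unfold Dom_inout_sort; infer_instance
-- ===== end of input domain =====

-- B inverts the control flow: labels start as "inout", an inverted index signal->positions is
-- built once, then "out" and "in" are scatter-written over those positions (in-pass last, so
-- 'in' wins ties as in A's if/elif).


-- ===== PORT A =====
def inout_sort (all_signal : List String) (in_signal : List String) (out_signal : List String) : List String :=
  all_signal.foldl (fun inout_only signal =>
    if in_signal.contains signal then inout_only ++ ["in"]
    else if out_signal.contains signal then inout_only ++ ["out"]
    else inout_only ++ ["inout"]) []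

-- ===== PORT B =====
def inout_sort_alt (all_signal : List String) (in_signal : List String) (out_signal : List String) : List String :=
  let result := all_signal.map (fun _ => "inout")
  let positions : PySem.Dict String (List Int) :=
    (PySem.List.enumerate all_signal 0).foldl
      (fun d p => d.modify p.2 [] (fun l => l ++ [p.1])) PySem.Dict.empty
  let result := out_signal.foldl
    (fun r sig => (positions.getD sig []).foldl (fun r i => PySem.List.pySetD r i "out") r) result
  let result := in_signal.foldl
    (fun r sig => (positions.getD sig []).foldl (fun r i => PySem.List.pySetD r i "in") r) result
  result

-- ===== PRECONDITION & SPEC =====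
def Spec_inout_sort (all_signal : List String) (in_signal : List String) (out_signal : List String) (out : List String) : Prop := out = inout_sort_alt all_signal in_signal out_signal
instance (all_signal : List String) (in_signal : List String) (out_signal : List String) (out : List String) : Decidable (Spec_inout_sort all_signal in_signal out_signal out) := by unfold Spec_inout_sort; infer_instance

-- ===== CLAIM =====
def Claim_equal_inout_sort : Prop := ∀ (all_signal : List String) (in_signal : List String) (out_signal : List String), Dom_inout_sort all_signal in_signal out_signal → Spec_inout_sort all_signal in_signal out_signal (inout_sort all_signal in_signal out_signal)

-- ===== LEMMAS AND PROOFS =====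

-- the positions of sig in all_signal, as the inverted index stores them
def pvPos (all_signal : List String) (sig : String) : List Int :=
  ((PySem.List.enumerate all_signal 0).filter (fun p => p.2 == sig)).map (·.1)

theorem positions_getD (all_signal : List String) (sig : String) :
    ((PySem.List.enumerate all_signal 0).foldl
      (fun d p => d.modify p.2 [] (fun l => l ++ [p.1])) PySem.Dict.empty).getD sig []
    = pvPos all_signal sig := by
  have h : (PySem.List.enumerate all_signal 0).foldl
      (fun d p => d.modify p.2 [] (fun l => l ++ [p.1])) PySem.Dict.empty
      = ((PySem.List.enumerate all_signal 0).map (fun p => (p.2, p.1))).foldl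
      (fun d p => d.modify p.1 [] (fun l => l ++ [p.2])) PySem.Dict.empty := by
    rw [List.foldl_map]
  rw [h, PySem.Dict.getD_foldl_modify_append, PySem.Dict.getD_empty]
  simp [pvPos, List.filter_map, List.map_map, Function.comp_def]

theorem mem_pvPos (all_signal : List String) (sig : String) (i : Int) :
    i ∈ pvPos all_signal sig ↔
      ∃ (k : Nat) (h : k < all_signal.length), i = (k : Int) ∧ all_signal[k] = sig := by
  simp only [pvPos, List.mem_map, List.mem_filter, PySem.List.mem_enumerate_iff]
  constructor
  · rintro ⟨p, ⟨⟨k, hk, rfl⟩, hs⟩, rfl⟩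
    exact ⟨k, hk, by simp, by simpa using hs⟩
  · rintro ⟨k, hk, rfl, hs⟩
    exact ⟨((k : Int), all_signal[k]), ⟨⟨k, hk, by simp⟩, by simpa using hs⟩, rfl⟩

theorem inner_length (v : String) (idxs : List Int) (r : List String) :
    (idxs.foldl (fun r i => PySem.List.pySetD r i v) r).length = r.length := by
  induction idxs generalizing r with
  | nil => rfl
  | cons i t ih => simp [List.foldl_cons, ih, PySem.List.length_pySetD]

theorem inner_getD (v : String) (idxs : List Int) (r : List String)
    (hidx : ∀ i ∈ idxs, 0 ≤ i ∧ i < (r.length : Int)) (j : Nat) (hj : j < r.length) :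
    (idxs.foldl (fun r i => PySem.List.pySetD r i v) r).getD j ""
      = if (j : Int) ∈ idxs then v else r.getD j "" := by
  induction idxs generalizing r with
  | nil => simp
  | cons i t ih =>
    obtain ⟨h0, hl⟩ := hidx i (List.mem_cons_self ..)
    have hset : PySem.List.pySetD r i v = r.set i.toNat v :=
      PySem.List.pySetD_of_nonneg _ _ h0
    have hlen : (PySem.List.pySetD r i v).length = r.length := PySem.List.length_pySetD ..
    rw [List.foldl_cons, ih (PySem.List.pySetD r i v)
      (fun x hx => by rw [hlen]; exact hidx x (List.mem_cons_of_mem _ hx)) (hlen ▸ hj)]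
    by_cases hmem : (j : Int) ∈ t
    · simp [hmem]
    · have hq : (j : Int) ∈ i :: t ↔ (j : Int) = i := by simp [hmem]
      rw [if_neg hmem, hset]
      by_cases he : (j : Int) = i
      · have : i.toNat = j := by omega
        rw [if_pos (hq.mpr he), this,
          List.getD_eq_getElem _ _ (by simp [hj]), List.getElem_set_self]
      · rw [if_neg (fun h => he (hq.mp h))]
        have hij : i.toNat ≠ j := by omega
        rw [List.getD_eq_getElem _ _ (by simp [hj]), List.getD_eq_getElem _ _ hj,
          List.getElem_set_ne hij]

theorem pass_length (positions : String → List Int)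
    (v : String) (sigs : List String) (r : List String) :
    (sigs.foldl (fun r sig => (positions sig).foldl
        (fun r i => PySem.List.pySetD r i v) r) r).length = r.length := by
  induction sigs generalizing r with
  | nil => rfl
  | cons s t ih => simp [List.foldl_cons, ih, inner_length]

theorem pass_getD (all_signal : List String) (v : String) (sigs : List String)
    (r : List String) (hr : r.length = all_signal.length)
    (j : Nat) (hj : j < all_signal.length) :
    (sigs.foldl (fun r sig => (pvPos all_signal sig).foldl
        (fun r i => PySem.List.pySetD r i v) r) r).getD j ""
      = if sigs.contains (all_signal.getD j "") then v else r.getD j "" := by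
  induction sigs generalizing r with
  | nil => simp
  | cons s t ih =>
    rw [List.foldl_cons]
    have hidx : ∀ i ∈ pvPos all_signal s, 0 ≤ i ∧ i < (r.length : Int) := by
      intro i hi
      obtain ⟨k, hk, rfl, _⟩ := (mem_pvPos all_signal s i).mp hi
      constructor <;> omega
    have hlen : ((pvPos all_signal s).foldl (fun r i => PySem.List.pySetD r i v) r).length
        = r.length := inner_length ..
    rw [ih _ (hlen.trans hr), inner_getD v _ r hidx j (hr ▸ hj)]
    have hmem : ((j : Int) ∈ pvPos all_signal s) ↔ all_signal.getD j "" = s := by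
      rw [mem_pvPos]
      constructor
      · rintro ⟨k, hk, hkj, rfl⟩
        have : k = j := by omega
        subst this; exact List.getD_eq_getElem _ _ hk
      · intro h
        exact ⟨j, hj, rfl, (List.getD_eq_getElem _ _ hj).symm.trans h⟩
    rw [List.contains_cons]
    by_cases hs : all_signal.getD j "" = s
    · have hin := hmem.mpr hs
      rw [if_pos hin]
      have hc : ((all_signal.getD j "" == s) || t.contains (all_signal.getD j "")) = true := by
        rw [show (all_signal.getD j "" == s) = true from beq_iff_eq.mpr hs, Bool.true_or]
      rw [hc, if_pos rfl, ite_self]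
    · have hnin : ¬ ((j : Int) ∈ pvPos all_signal s) := fun h => hs (hmem.mp h)
      rw [if_neg hnin]
      have hc : ((all_signal.getD j "" == s) || t.contains (all_signal.getD j ""))
          = t.contains (all_signal.getD j "") := by
        rw [show (all_signal.getD j "" == s) = false from beq_eq_false_iff_ne.mpr hs,
          Bool.false_or]
      rw [hc]

theorem foldl_append_branch (all_signal : List String)
    (f : String → String) (acc : List String) :
    (all_signal.foldl (fun r s => r ++ [f s]) acc) = acc ++ all_signal.map f := by
  induction all_signal generalizing acc with
  | nil => simp
  | cons a t ih => simp [List.foldl_cons, ih]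

-- ===== VERDICT =====
theorem inout_sort_spec : Claim_equal_inout_sort := by
  intro all_signal in_signal out_signal _
  show inout_sort all_signal in_signal out_signal = inout_sort_alt all_signal in_signal out_signal
  unfold inout_sort inout_sort_alt
  simp only [positions_getD]
  rw [show (fun (inout_only : List String) signal =>
        if in_signal.contains signal then inout_only ++ ["in"]
        else if out_signal.contains signal then inout_only ++ ["out"]
        else inout_only ++ ["inout"])
      = (fun r s => r ++ [if in_signal.contains s then "in"
              else if out_signal.contains s then "out" else "inout"]) from by
        funext r s; split_ifs <;> rfl]
  rw [foldl_append_branch, List.nil_append]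
  set r0 := all_signal.map (fun _ => "inout") with hr0
  have hr0len : r0.length = all_signal.length := by simp [hr0]
  set r1 := out_signal.foldl (fun r sig => (pvPos all_signal sig).foldl
      (fun r i => PySem.List.pySetD r i "out") r) r0 with hr1
  have hr1len : r1.length = all_signal.length :=
    (pass_length (pvPos all_signal) "out" out_signal r0).trans hr0len
  apply List.ext_getElem
  · simp only [List.length_map]
    exact ((pass_length (pvPos all_signal) "in" in_signal r1).trans hr1len).symm
  · intro j hj hj'
    have hjn : j < all_signal.length := by simpa using hj
    have hr0v : r0.getD j "" = "inout" := by
      rw [List.getD_eq_getElem _ _ (show j < r0.length from hr0len ▸ hjn)]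
      simp [hr0]
    have hrhs : (in_signal.foldl (fun r sig => (pvPos all_signal sig).foldl
        (fun r i => PySem.List.pySetD r i "in") r) r1)[j]'hj'
        = if in_signal.contains all_signal[j] then "in"
          else if out_signal.contains all_signal[j] then "out" else "inout" := by
      rw [← List.getD_eq_getElem _ "" hj',
        pass_getD all_signal "in" in_signal r1 hr1len j hjn, hr1,
        pass_getD all_signal "out" out_signal r0 hr0len j hjn,
        List.getD_eq_getElem _ _ hjn, hr0v]
    rw [List.getElem_map, hrhs]
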